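-- pv_equiv track=rewrite | github.com/Samet732/wordG | src/string_methods.py | compare_capitals
-- ===== SOURCE A (Python) =====
-- def compare_capitals(str1: str, str2: str):
--     str1 = list(str1)
--     str2 = list(str2)
--
--     for i in range(len(str1)):
--         for j in range(len(str2)):
--             if str1[i].upper() == str2[j]:
--                 str1[i] = str1[i].upper()
--
--     return ''.join(str1)
-- ===== SOURCE B (Python) =====
-- def compare_capitals(str1: str, str2: str):
--     chars2 = set(str2)
--     table = {ord(c): c.upper() for c in set(str1) if c.upper() in chars2}
--     return str1.translate(table)
-- ===== Notes on version B (the rewrite author's own statement) =====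
-- stated objective: faster
-- what changed: Instead of A's nested per-character scan of str2, B prebuilds a translation table (ord(c) -> c.upper()) over the distinct characters of str1 whose uppercase lies in the set of str2's characters, then produces the result in one str.translate pass.
import Mathlib
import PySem

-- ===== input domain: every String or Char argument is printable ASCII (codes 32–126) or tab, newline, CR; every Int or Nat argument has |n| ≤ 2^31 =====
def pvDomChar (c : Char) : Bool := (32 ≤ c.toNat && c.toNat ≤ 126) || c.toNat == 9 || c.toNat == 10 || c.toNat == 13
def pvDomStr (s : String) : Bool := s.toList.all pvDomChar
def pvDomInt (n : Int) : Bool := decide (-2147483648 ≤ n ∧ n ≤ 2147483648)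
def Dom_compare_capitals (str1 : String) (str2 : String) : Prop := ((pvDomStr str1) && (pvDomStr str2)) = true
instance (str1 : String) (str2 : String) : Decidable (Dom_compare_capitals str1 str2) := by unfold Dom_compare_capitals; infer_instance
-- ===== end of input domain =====

-- B prebuilds a translation table (ord c -> upper c) over the distinct chars of str1 whose uppercase is in str2's character set, then maps str1 through it in one pass (A scans str2 per character).


-- ===== PORT A =====
-- for i: for j: if str1[i].upper() == str2[j]: str1[i] = str1[i].upper()  — each position is
-- updated independently, so the i-loop is a map and the j-loop a fold over str2's characters.
def compare_capitals (str1 : String) (str2 : String) : String :=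
  String.ofList (str1.toList.map (fun c =>
    str2.toList.foldl
      (fun cur d => if PySem.Chars.upperChar cur == d then PySem.Chars.upperChar cur else cur)
      c))

-- ===== PORT B =====
-- table = {ord(c): c.upper() for c in set(str1) if c.upper() in chars2}; str1.translate(table).
-- The set comprehension's hash order does not matter: keys are distinct and the dict is only
-- looked up, so we iterate the distinct characters in first-occurrence order (PySem.Set.ofList).
-- str.translate(table) is ported by hand as a per-character lookup of ord(c) with identity
-- default — exact, since the table's values are single characters.
def compare_capitals_alt (str1 : String) (str2 : String) : String :=
  let chars2 : PySem.Set Char := PySem.Set.ofList str2.toList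
  let table : PySem.Dict Int Char :=
    (PySem.Set.ofList str1.toList).foldl
      (fun d c =>
        if PySem.Chars.upperChar c ∈ chars2 then
          d.insert ((c.toNat : Int)) (PySem.Chars.upperChar c)
        else d)
      PySem.Dict.empty
  String.ofList (str1.toList.map (fun c => (table.get? ((c.toNat : Int))).getD c))

-- ===== PRECONDITION & SPEC =====
def Spec_compare_capitals (str1 : String) (str2 : String) (out : String) : Prop := out = compare_capitals_alt str1 str2
instance (str1 : String) (str2 : String) (out : String) : Decidable (Spec_compare_capitals str1 str2 out) := by unfold Spec_compare_capitals; infer_instance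

-- ===== CLAIM =====
def Claim_equal_compare_capitals : Prop := ∀ (str1 : String) (str2 : String), Dom_compare_capitals str1 str2 → Spec_compare_capitals str1 str2 (compare_capitals str1 str2)

-- ===== LEMMAS AND PROOFS =====

theorem upper_idem (c : Char) : PySem.Chars.upperChar (PySem.Chars.upperChar c) = PySem.Chars.upperChar c := by
  unfold PySem.Chars.upperChar PySem.Chars.islower
  split_ifs with h1 h2 <;> try rfl
  exfalso
  simp only [Bool.and_eq_true, decide_eq_true_eq, Char.le_def, UInt32.le_iff_toNat_le] at h1 h2
  obtain ⟨a1, a2⟩ := h1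
  obtain ⟨b1, b2⟩ := h2
  have hz : ('z'.val).toNat = 122 := rfl
  have ha : ('a'.val).toNat = 97 := rfl
  rw [hz] at a2; rw [ha] at a1 b1
  have a2' : c.toNat ≤ 122 := a2
  have a1' : 97 ≤ c.toNat := a1
  have hv : (Char.ofNat (c.toNat - 32)).toNat = c.toNat - 32 := by
    rw [Char.toNat_ofNat, if_pos]
    constructor; omega
  have b1' : 97 ≤ (Char.ofNat (c.toNat - 32)).toNat := b1
  omega

-- A's inner j-loop over str2 equals "uppercase iff the uppercased char occurs in str2".
theorem inner_fold_eq (l : List Char) (c : Char) :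
    l.foldl (fun cur d => if PySem.Chars.upperChar cur == d then PySem.Chars.upperChar cur else cur) c
      = if PySem.Chars.upperChar c ∈ l then PySem.Chars.upperChar c else c := by
  induction l generalizing c with
  | nil => simp
  | cons d t ih =>
    simp only [List.foldl_cons, List.mem_cons]
    by_cases h : PySem.Chars.upperChar c = d
    · rw [if_pos (by simp [h]), ih, upper_idem]
      simp [h]
    · rw [if_neg (by simp [h]), ih]
      simp [h]

theorem char_toNat_int_inj {a b : Char} (h : (a.toNat : Int) = (b.toNat : Int)) : a = b := by
  have : a.toNat = b.toNat := by exact_mod_cast h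
  exact Char.ext (UInt32.toBitVec_inj.mp (BitVec.toNat_inj.mp this))

-- a fold that never inserts key k leaves get? k unchanged
theorem get?_foldl_not_mem (P : Char → Prop) [DecidablePred P] (u : Char → Char)
    (t : List Char) (d : PySem.Dict Int Char) (k : Int)
    (h : ∀ x ∈ t, ((x.toNat : Int)) ≠ k) :
    (t.foldl (fun d c => if P c then d.insert ((c.toNat : Int)) (u c) else d) d).get? k
      = d.get? k := by
  induction t generalizing d with
  | nil => rfl
  | cons x t ih =>
    simp only [List.foldl_cons]
    rw [ih _ (fun y hy => h y (List.mem_cons_of_mem _ hy))]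
    by_cases hp : P x
    · rw [if_pos hp, PySem.Dict.get?_insert_of_ne _ _ (fun he => h x List.mem_cons_self he.symm)]
    · rw [if_neg hp]

-- lookup in the table built over a duplicate-free list
theorem get?_table (P : Char → Prop) [DecidablePred P] (u : Char → Char)
    (l : List Char) (d : PySem.Dict Int Char) (c : Char)
    (hc : c ∈ l) (hnd : l.Nodup) :
    (l.foldl (fun d c => if P c then d.insert ((c.toNat : Int)) (u c) else d) d).get? ((c.toNat : Int))
      = if P c then some (u c) else d.get? ((c.toNat : Int)) := by
  induction l generalizing d with
  | nil => exact absurd hc (List.not_mem_nil)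
  | cons x t ih =>
    simp only [List.foldl_cons]
    rcases List.mem_cons.mp hc with h | h
    · subst h
      have hx : c ∉ t := (List.nodup_cons.mp hnd).1
      rw [get?_foldl_not_mem P u t _ _
        (fun y hy he => hx (by rw [← char_toNat_int_inj he]; exact hy))]
      by_cases hp : P c
      · rw [if_pos hp, if_pos hp, PySem.Dict.get?_insert_self]
      · rw [if_neg hp, if_neg hp]
    · have hnx : c ≠ x := fun he => (List.nodup_cons.mp hnd).1 (he ▸ h)
      rw [ih _ h (List.nodup_cons.mp hnd).2]
      by_cases hp : P c
      · rw [if_pos hp, if_pos hp]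
      · rw [if_neg hp, if_neg hp]
        by_cases hpx : P x
        · rw [if_pos hpx, PySem.Dict.get?_insert_of_ne _ _
            (fun he => hnx (char_toNat_int_inj he))]
        · rw [if_neg hpx]

-- ===== VERDICT =====
theorem compare_capitals_spec : Claim_equal_compare_capitals := by
  intro str1 str2 _
  unfold Spec_compare_capitals compare_capitals compare_capitals_alt
  simp only [inner_fold_eq]
  congr 1
  apply List.map_congr_left
  intro c hc
  rw [get?_table (fun c => PySem.Chars.upperChar c ∈ PySem.Set.ofList str2.toList)
      PySem.Chars.upperChar _ _ _ ((PySem.Set.mem_ofList _ _).mpr hc) (PySem.Set.nodup_ofList _)]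
  by_cases h : PySem.Chars.upperChar c ∈ str2.toList
  · rw [if_pos ((PySem.Set.mem_ofList _ _).mpr h), if_pos h]; rfl
  · rw [if_neg (fun hm => h ((PySem.Set.mem_ofList _ _).mp hm)), if_neg h, PySem.Dict.get?_empty]; rfl
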